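-- pv_equiv track=rewrite | github.com/Yjinaa/codetree-TILs | 250218/행복한 수열의 개수/number-of-happy-sequence.py | get_happies
-- ===== SOURCE A (Python) =====
-- def check_happy(nums, m):
--     cnt = 1
--     for i in range(1, len(nums)):
--         if nums[i] == nums[i-1]:
--             cnt += 1
--         else:
--             cnt = 1
--     if cnt >= m:
--         return True
--     else:
--         return False
--
-- def get_happies(grid,m):
--     happies = 0
--     for _ in range(2):
--         for row in grid:
--             if check_happy(row,m):
--                 happies += 1
--         grid = list(map(list, zip(*grid)))
--     return happies
-- ===== SOURCE B (Python) =====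
-- def run_len(row):
--     cnt = 1
--     for j in range(1, len(row)):
--         cnt = cnt + 1 if row[j] == row[j - 1] else 1
--     return cnt
--
-- def get_happies(grid, m):
--     w = min((len(r) for r in grid), default=0)
--     happies = 0
--     col_cnt = [1] * w
--     prev = None
--     for row in grid:
--         if run_len(row) >= m:
--             happies += 1
--         if prev is not None:
--             col_cnt = [col_cnt[j] + 1 if row[j] == prev[j] else 1 for j in range(w)]
--         prev = row
--     return happies + sum(1 for c in col_cnt if c >= m)
-- ===== Notes on version B (the rewrite author's own statement) =====
-- stated objective: alternative
-- what changed: B replaces A's two-phase scheme (count rows, then materialize the transpose and count its rows) with a single row-by-row pass that counts happy rows while incrementally maintaining per-column trailing-run counters, so no transposed grid is ever built.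
import Mathlib
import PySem

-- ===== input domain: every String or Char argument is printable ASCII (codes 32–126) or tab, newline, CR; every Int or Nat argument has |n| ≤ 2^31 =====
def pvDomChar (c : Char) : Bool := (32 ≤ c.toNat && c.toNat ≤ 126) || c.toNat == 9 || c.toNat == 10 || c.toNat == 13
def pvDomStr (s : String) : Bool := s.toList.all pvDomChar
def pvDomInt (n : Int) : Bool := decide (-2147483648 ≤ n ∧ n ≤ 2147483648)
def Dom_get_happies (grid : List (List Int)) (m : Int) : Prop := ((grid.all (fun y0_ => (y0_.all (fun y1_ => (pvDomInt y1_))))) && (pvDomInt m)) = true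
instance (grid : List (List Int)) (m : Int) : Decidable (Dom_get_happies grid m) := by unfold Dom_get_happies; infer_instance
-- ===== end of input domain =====

-- B replaces A's two-phase row-count-then-transpose-and-count scheme with one row-by-row pass
-- maintaining per-column trailing-run counters (objective: alternative decomposition, no materialized transpose).

-- ===== PORT A =====
-- A-side helper: check_happy(nums, m)
def check_happy (nums : List Int) (m : Int) : Bool :=
  let cnt := (PySem.List.pyRange 1 (nums.length : Int) 1).foldl
    (fun cnt i => if PySem.List.pyGetD nums i 0 == PySem.List.pyGetD nums (i - 1) 0 then cnt + 1 else 1)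
    (1 : Int)
  decide (cnt ≥ m)

-- A's 'for _ in range(2)' loop unrolled: count rows, rebuild grid as list(map(list, zip(*grid))), count again;
-- zip(*grid) truncates every column to the shortest row length w, so row j of the rebuilt grid is
-- [r[j] for r in grid] for j < w (getD is exact there since j < w ≤ len r for every row r)
def get_happies (grid : List (List Int)) (m : Int) : Int :=
  let happies1 := grid.foldl (fun h row => if check_happy row m then h + 1 else h) (0 : Int)
  let w := ((grid.map List.length).min?).getD 0
  let grid2 := (List.range w).map (fun j => grid.map (fun r => r.getD j 0))
  grid2.foldl (fun h row => if check_happy row m then h + 1 else h) happies1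

-- ===== PORT B =====
-- B-side helper: run_len(row), the trailing equal-run length scan
def run_len (row : List Int) : Int :=
  (PySem.List.pyRange 1 (row.length : Int) 1).foldl
    (fun cnt j => if PySem.List.pyGetD row j 0 == PySem.List.pyGetD row (j - 1) 0 then cnt + 1 else 1)
    (1 : Int)

-- one step of B's single pass: bump happies if the row is happy, refresh the column counters from prev
-- (getD is exact for the j-indexing since j < w = minimum row length)
def stepB (w : Nat) (m : Int) (st : Int × List Int × Option (List Int)) (row : List Int) :
    Int × List Int × Option (List Int) :=
  ( if run_len row ≥ m then st.1 + 1 else st.1,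
    (match st.2.2 with
      | none => st.2.1
      | some prev =>
          (List.range w).map (fun j => if row.getD j 0 == prev.getD j 0 then st.2.1.getD j 0 + 1 else 1)),
    some row )

def get_happies_alt (grid : List (List Int)) (m : Int) : Int :=
  let w := ((grid.map List.length).min?).getD 0
  let st := grid.foldl (stepB w m) (0, List.replicate w 1, none)
  st.1 + st.2.1.foldl (fun h c => if c ≥ m then h + 1 else h) (0 : Int)

-- ===== PRECONDITION & SPEC =====
def Spec_get_happies (grid : List (List Int)) (m : Int) (out : Int) : Prop := out = get_happies_alt grid m
instance (grid : List (List Int)) (m : Int) (out : Int) : Decidable (Spec_get_happies grid m out) := by unfold Spec_get_happies; infer_instance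

-- ===== CLAIM (what is proved, stated in full; the proofs are below) =====
def Claim_equal_get_happies : Prop := ∀ (grid : List (List Int)) (m : Int), Dom_get_happies grid m → Spec_get_happies grid m (get_happies grid m)

-- ===== LEMMAS AND PROOFS =====

-- column j of a prefix of rows (as B's counters see it)
def colj (pref : List (List Int)) (j : Nat) : List Int := pref.map (fun r => r.getD j 0)

-- running count of happy rows, Prop-test form
def rowCap (pref : List (List Int)) (m : Int) : Int :=
  pref.foldl (fun h row => if run_len row ≥ m then h + 1 else h) 0

theorem run_len_singleton (x : Int) : run_len [x] = 1 := by
  simp [run_len, PySem.List.pyRange_one_eq_nil]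

-- appending one element to a nonempty list updates its trailing-run length the way B's counters do
theorem run_len_snoc (ys : List Int) (x : Int) (hys : ys ≠ []) :
    run_len (ys ++ [x]) = if x == ys.getD (ys.length - 1) 0 then run_len ys + 1 else 1 := by
  have hlen : (1:Int) ≤ (ys.length : Int) := by
    have := List.length_pos_iff.mpr hys; omega
  unfold run_len
  have hcast : ((ys ++ [x]).length : Int) = (ys.length : Int) + 1 := by simp
  rw [hcast, PySem.List.pyRange_one_succ_right hlen, List.foldl_append]
  have hinner : (PySem.List.pyRange 1 (ys.length : Int) 1).foldl
      (fun cnt j => if PySem.List.pyGetD (ys ++ [x]) j 0 == PySem.List.pyGetD (ys ++ [x]) (j - 1) 0 then cnt + 1 else 1) (1 : Int)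
      = (PySem.List.pyRange 1 (ys.length : Int) 1).foldl
      (fun cnt j => if PySem.List.pyGetD ys j 0 == PySem.List.pyGetD ys (j - 1) 0 then cnt + 1 else 1) (1 : Int) := by
    apply PySem.List.foldl_congr_mem
    intro acc i hi
    rw [PySem.List.mem_pyRange_one] at hi
    have h1 : PySem.List.pyGetD (ys ++ [x]) i 0 = PySem.List.pyGetD ys i 0 := by
      rw [PySem.List.pyGetD_of_nonneg _ _ (by omega), PySem.List.pyGetD_of_nonneg _ _ (by omega),
        List.getD_append _ _ _ _ (by omega)]
    have h2 : PySem.List.pyGetD (ys ++ [x]) (i - 1) 0 = PySem.List.pyGetD ys (i - 1) 0 := by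
      rw [PySem.List.pyGetD_of_nonneg _ _ (by omega), PySem.List.pyGetD_of_nonneg _ _ (by omega),
        List.getD_append _ _ _ _ (by omega)]
    rw [h1, h2]
  simp only [List.foldl_cons, List.foldl_nil]
  have hx : PySem.List.pyGetD (ys ++ [x]) (ys.length : Int) 0 = x := by
    rw [PySem.List.pyGetD_of_nonneg _ _ (by omega)]
    simp [List.getD]
  have hl : PySem.List.pyGetD (ys ++ [x]) ((ys.length : Int) - 1) 0 = ys.getD (ys.length - 1) 0 := by
    rw [PySem.List.pyGetD_of_nonneg _ _ (by omega), List.getD_append _ _ _ _ (by omega)]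
    congr 1
    omega
  rw [hx, hl]
  split_ifs with hc
  · exact congrArg (· + 1) hinner
  · rfl

theorem rowCap_snoc (pref : List (List Int)) (r : List Int) (m : Int) :
    rowCap (pref ++ [r]) m = if run_len r ≥ m then rowCap pref m + 1 else rowCap pref m := by
  simp [rowCap, List.foldl_append]

theorem colj_snoc (pref : List (List Int)) (r : List Int) (j : Nat) :
    colj (pref ++ [r]) j = colj pref j ++ [r.getD j 0] := by simp [colj]

-- B's loop invariant: after the rows done ++ [last], the state holds the happy-row count so far,
-- the trailing-run length of every (truncated) column so far, and the last row seen
theorem b_fold_aux (w : Nat) (m : Int) :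
    ∀ (rest done : List (List Int)) (last : List Int),
      rest.foldl (stepB w m)
        (rowCap (done ++ [last]) m,
         (List.range w).map (fun j => run_len (colj (done ++ [last]) j)),
         some last)
      = (rowCap (done ++ [last] ++ rest) m,
         (List.range w).map (fun j => run_len (colj (done ++ [last] ++ rest) j)),
         some ((last :: rest).getLast (by simp))) := by
  intro rest
  induction rest with
  | nil => intro done last; simp
  | cons r rest' ih =>
    intro done last
    rw [List.foldl_cons]
    have hstep : stepB w m
        (rowCap (done ++ [last]) m,
         (List.range w).map (fun j => run_len (colj (done ++ [last]) j)),
         some last) r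
        = (rowCap ((done ++ [last]) ++ [r]) m,
           (List.range w).map (fun j => run_len (colj ((done ++ [last]) ++ [r]) j)),
           some r) := by
      unfold stepB
      refine Prod.ext ?_ (Prod.ext ?_ rfl)
      · exact (rowCap_snoc _ _ _).symm
      · simp only []
        apply List.map_congr_left
        intro j hj
        rw [List.mem_range] at hj
        rw [colj_snoc, run_len_snoc _ _ (by simp [colj]),
          PySem.List.getD_map_range _ _ _ _ hj]
        congr 2
        · have : colj (done ++ [last]) j = colj done j ++ [last.getD j 0] := colj_snoc done last j
          rw [this]
          simp [List.getD]
    rw [hstep, ih (done ++ [last]) r]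
    refine Prod.ext ?_ (Prod.ext ?_ ?_)
    · simp
    · simp
    · simp [List.getLast_cons]

-- A's row-counting fold is an init plus a countP
theorem check_fold_eq_rowCap (grid : List (List Int)) (m : Int) (a : Int) :
    grid.foldl (fun h row => if check_happy row m then h + 1 else h) a
      = a + (grid.countP (fun row => decide (run_len row ≥ m))) := by
  have : (fun h row => if check_happy row m then h + 1 else h)
      = (fun (h : Int) row => if run_len row ≥ m then h + 1 else h) := by
    funext h row
    simp [check_happy, run_len]
  rw [this, PySem.List.foldl_ite_add_one]

theorem main_eq (grid : List (List Int)) (m : Int) :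
    get_happies grid m = get_happies_alt grid m := by
  cases grid with
  | nil => rfl
  | cons r rest =>
    unfold get_happies get_happies_alt
    simp only []
    set w := (((r :: rest).map List.length).min?).getD 0 with hw
    have hinit : stepB w m (0, List.replicate w 1, none) r
        = (rowCap ([] ++ [r]) m,
           (List.range w).map (fun j => run_len (colj ([] ++ [r]) j)),
           some r) := by
      unfold stepB
      refine Prod.ext ?_ (Prod.ext ?_ rfl)
      · simp [rowCap]
      · simp only []
        rw [show ([] ++ [r] : List (List Int)) = [r] by simp]
        have : (List.range w).map (fun j => run_len (colj [r] j)) = (List.range w).map (fun _ => (1:Int)) := by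
          apply List.map_congr_left; intro j hj; simp [colj, run_len_singleton]
        rw [this]
        simp [List.map_const']
    rw [List.foldl_cons (f := stepB w m), hinit, b_fold_aux w m rest [] r]
    simp only [List.nil_append, List.singleton_append]
    rw [List.foldl_map, check_fold_eq_rowCap]
    have : ((List.range w).map (fun j => run_len (colj (r :: rest) j))).foldl
        (fun h c => if c ≥ m then h + 1 else h) (0 : Int)
        = (List.range w).foldl (fun h j => if run_len (colj (r :: rest) j) ≥ m then h + 1 else h) 0 := by
      rw [List.foldl_map]
    rw [this, PySem.List.foldl_ite_add_one]
    rw [PySem.List.foldl_ite_add_one]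
    have hrc : rowCap (r :: rest) m
        = (0:Int) + (((r :: rest).countP (fun row => decide (run_len row ≥ m))) : Int) := by
      unfold rowCap
      rw [PySem.List.foldl_ite_add_one]
    rw [hrc]
    have hcp : (List.range w).countP
          (fun x => decide (check_happy (List.map (fun r => r.getD x 0) (r :: rest)) m = true))
        = (List.range w).countP (fun j => decide (run_len (colj (r :: rest) j) ≥ m)) := by
      apply List.countP_congr
      intro j hj
      simp [check_happy, run_len, colj]
    rw [hcp]
    ring

-- ===== VERDICT (by name: the statement is the Claim_ definition above) =====
theorem get_happies_spec : Claim_equal_get_happies := by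
  intro grid m _
  unfold Spec_get_happies
  exact main_eq grid m
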